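-- pv_equiv track=rewrite | github.com/gowthamprabakar/Nexus-Cyber-security-OS | packages/agents/network-threat/src/network_threat/enrichment.py | _match_domain_suffix
-- ===== SOURCE A (Python) =====
-- from typing import Any
--
-- def _match_domain_suffix(qname: str, intel: dict[str, Any]) -> str:
--     """Return the matched `known_bad_domains` entry (longest-match) or ''."""
--     if not qname:
--         return ""
--     lower = qname.lower().rstrip(".")
--     best = ""
--     for entry in intel["known_bad_domains"]:
--         entry_l = entry.lower().rstrip(".")
--         # Exact match OR proper-suffix match (must be preceded by '.').
--         matches = lower == entry_l or lower.endswith("." + entry_l)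
--         if matches and len(entry_l) > len(best):
--             best = entry_l
--     return best
-- ===== SOURCE B (Python) =====
-- def _match_domain_suffix(qname: str, intel: dict) -> str:
--     """Return the matched `known_bad_domains` entry (longest-match) or ''."""
--     if not qname:
--         return ""
--     bad = {e.lower().rstrip(".") for e in intel["known_bad_domains"]}
--     cand = qname.lower().rstrip(".")
--     while cand:
--         if cand in bad:
--             return cand
--         dot = cand.find(".")
--         if dot == -1:
--             return ""
--         cand = cand[dot + 1:]
--     return ""
-- ===== Notes on version B (the rewrite author's own statement) =====
-- stated objective: idiomatic
-- what changed: Instead of scanning every bad-domain entry and keeping the longest match, B builds a set of normalized entries once and walks the query's own dot-boundary suffixes longest-first, returning the first one found in the set.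
import Mathlib
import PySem

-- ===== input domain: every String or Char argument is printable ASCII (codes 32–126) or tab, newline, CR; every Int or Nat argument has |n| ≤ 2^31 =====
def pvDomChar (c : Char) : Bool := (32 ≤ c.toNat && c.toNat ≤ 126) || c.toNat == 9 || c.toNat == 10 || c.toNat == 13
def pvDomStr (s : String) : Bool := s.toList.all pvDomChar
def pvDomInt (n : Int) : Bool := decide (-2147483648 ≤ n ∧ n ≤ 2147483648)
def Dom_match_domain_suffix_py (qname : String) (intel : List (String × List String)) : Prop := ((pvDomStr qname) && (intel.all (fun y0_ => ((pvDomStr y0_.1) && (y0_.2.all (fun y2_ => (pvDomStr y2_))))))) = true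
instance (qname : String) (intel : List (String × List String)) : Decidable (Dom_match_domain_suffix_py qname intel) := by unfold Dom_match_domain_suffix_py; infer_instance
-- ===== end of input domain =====

-- B replaces A's scan over every bad-domain entry (keeping the longest match) by a set of
-- normalized entries plus a longest-first walk over the query's own dot-boundary suffixes.


-- s.rstrip(".") — exact: Python removes all trailing '.' characters (hand port; PySem has no right-only strip with chars)
def pvRstripDot (s : List Char) : List Char := (s.reverse.dropWhile (· == '.')).reverse

-- entry.lower().rstrip(".") — the normalization both Pythons apply
def pvNorm (e : String) : List Char := pvRstripDot (PySem.Chars.lower e.toList)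

-- ===== PORT A =====
def match_domain_suffix_py (qname : String) (intel : List (String × List String)) : String :=
  if qname.toList = [] then "" else
  let lower := pvRstripDot (PySem.Chars.lower qname.toList)
  match (PySem.Dict.mk intel).get? "known_bad_domains" with
  | none => ""   -- Python raises KeyError here; excluded by Pre_
  | some entries =>
    String.mk (entries.foldl (fun best entry =>
      let entry_l := pvNorm entry
      let mtch := decide (lower = entry_l) || PySem.Chars.endswith lower ('.' :: entry_l)
      if mtch && decide (entry_l.length > best.length) then entry_l else best) [])

-- ===== PORT B =====
-- the while-loop of Source B: try cand, then chop up to (and including) the first '.'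
def pvBLoop (cand : List Char) (bad : PySem.Set (List Char)) : List Char :=
  if cand = [] then []
  else if cand ∈ bad then cand
  else
    let dot := PySem.Chars.find cand ['.']
    if dot = -1 then []
    else pvBLoop (cand.drop (dot.toNat + 1)) bad
termination_by cand.length
decreasing_by
  simp only [List.length_drop]
  rename_i h _ _
  cases cand with
  | nil => exact absurd rfl h
  | cons a t => simp

def match_domain_suffix_py_alt (qname : String) (intel : List (String × List String)) : String :=
  if qname.toList = [] then "" else
  match (PySem.Dict.mk intel).get? "known_bad_domains" with
  | none => ""   -- Python raises KeyError here; excluded by Pre_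
  | some entries =>
    let bad := PySem.Set.ofList (entries.map pvNorm)
    String.mk (pvBLoop (pvRstripDot (PySem.Chars.lower qname.toList)) bad)

-- ===== PRECONDITION & SPEC =====
-- Pre_ excludes only inputs where A raises KeyError: nonempty qname with no "known_bad_domains" key.
def Pre_match_domain_suffix_py (qname : String) (intel : List (String × List String)) : Prop :=
  qname = "" ∨ ((PySem.Dict.mk intel).get? "known_bad_domains").isSome = true
instance (qname : String) (intel : List (String × List String)) : Decidable (Pre_match_domain_suffix_py qname intel) := by unfold Pre_match_domain_suffix_py; infer_instance

def pvWitness_match_domain_suffix_py : String × (List (String × List String)) :=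
  ("evil.Bad.com", [("known_bad_domains", ["bad.com", "other.org"])])

def Spec_match_domain_suffix_py (qname : String) (intel : List (String × List String)) (out : String) : Prop := out = match_domain_suffix_py_alt qname intel
instance (qname : String) (intel : List (String × List String)) (out : String) : Decidable (Spec_match_domain_suffix_py qname intel out) := by unfold Spec_match_domain_suffix_py; infer_instance

-- ===== CLAIM (what is proved, stated in full; the proofs are below) =====
def Claim_equal_match_domain_suffix_py : Prop := ∀ (qname : String) (intel : List (String × List String)), Dom_match_domain_suffix_py qname intel → Pre_match_domain_suffix_py qname intel → Spec_match_domain_suffix_py qname intel (match_domain_suffix_py qname intel)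

-- ===== LEMMAS AND PROOFS =====

-- "entry matches lower" as A tests it (without the length guard)
def RawMatch (L c : List Char) : Prop := c = L ∨ ('.' :: c) <:+ L
-- a *usable* match: additionally nonempty (A's length guard forces this for a best ≠ "")
def MatchesB (L c : List Char) : Prop := c ≠ [] ∧ RawMatch L c

theorem rawMatch_suffix {L c : List Char} (h : RawMatch L c) : c <:+ L := by
  rcases h with h | h
  · exact h ▸ List.suffix_rfl
  · exact (List.suffix_cons '.' c).trans h

theorem matches_unique {L c c' : List Char} (h : MatchesB L c) (h' : MatchesB L c')
    (hl : c.length = c'.length) : c = c' := by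
  rcases List.suffix_or_suffix_of_suffix (rawMatch_suffix h.2) (rawMatch_suffix h'.2) with hs | hs
  · exact hs.eq_of_length hl
  · exact (hs.eq_of_length hl.symm).symm

-- A's fold, abstracted
def aFold (L : List Char) (entries : List String) (best : List Char) : List Char :=
  entries.foldl (fun best entry =>
      let entry_l := pvNorm entry
      let mtch := decide (L = entry_l) || PySem.Chars.endswith L ('.' :: entry_l)
      if mtch && decide (entry_l.length > best.length) then entry_l else best) best

theorem aFold_inv (L : List Char) (entries : List String) : ∀ best : List Char,
    best.length ≤ (aFold L entries best).length ∧
    (aFold L entries best = best ∨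
      (aFold L entries best ∈ entries.map pvNorm ∧ MatchesB L (aFold L entries best))) ∧
    (∀ e ∈ entries, RawMatch L (pvNorm e) → (pvNorm e).length ≤ (aFold L entries best).length) := by
  induction entries with
  | nil => intro best; exact ⟨le_refl _, Or.inl rfl, by simp⟩
  | cons e rest ih =>
    intro best
    have hstep : aFold L (e :: rest) best =
        aFold L rest (if ((decide (L = pvNorm e) || PySem.Chars.endswith L ('.' :: pvNorm e))
         && decide ((pvNorm e).length > best.length)) = true then pvNorm e else best) := rfl
    set best' := (if ((decide (L = pvNorm e) || PySem.Chars.endswith L ('.' :: pvNorm e))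
         && decide ((pvNorm e).length > best.length)) = true then pvNorm e else best) with hb'
    obtain ⟨hmono, hmem, hmax⟩ := ih best'
    rw [hstep]
    rcases Bool.eq_false_or_eq_true ((decide (L = pvNorm e) || PySem.Chars.endswith L ('.' :: pvNorm e))
         && decide ((pvNorm e).length > best.length)) with hc | hc
    · -- hc = true: the head entry is taken
      have hbe : best' = pvNorm e := by rw [hb', hc]; simp
      have hmono' : (pvNorm e).length ≤ (aFold L rest best').length := by
        rw [← hbe]; exact hmono
      simp only [Bool.and_eq_true, Bool.or_eq_true, decide_eq_true_eq] at hc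
      have hraw : RawMatch L (pvNorm e) := by
        rcases hc.1 with h | h
        · exact Or.inl h.symm
        · exact Or.inr ((PySem.Chars.endswith_iff L ('.' :: pvNorm e)).mp h)
      have hne : pvNorm e ≠ [] := by
        intro h0; rw [h0] at hc; simp at hc
      refine ⟨le_trans (le_of_lt hc.2) hmono', ?_, ?_⟩
      · rcases hmem with h | h
        · refine Or.inr ?_
          rw [h, hbe]
          exact ⟨by simp, hne, hraw⟩
        · exact Or.inr ⟨by rw [List.map_cons]; exact List.mem_cons_of_mem _ h.1, h.2⟩
      · intro x hx hrx
        rcases List.mem_cons.mp hx with hx | hx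
        · rw [hx]; exact hmono'
        · exact hmax x hx hrx
    · -- hc = false: the head entry is skipped
      have hbe : best' = best := by rw [hb', hc]; simp
      have hmono' : best.length ≤ (aFold L rest best').length := by
        rw [← hbe]; exact hmono
      refine ⟨hmono', ?_, ?_⟩
      · rcases hmem with h | h
        · exact Or.inl (h.trans hbe)
        · exact Or.inr ⟨by rw [List.map_cons]; exact List.mem_cons_of_mem _ h.1, h.2⟩
      · intro x hx hrx
        rcases List.mem_cons.mp hx with hx | hx
        · -- skipped: matches, so it must be too short
          subst hx
          have hm : (decide (L = pvNorm x) || PySem.Chars.endswith L ('.' :: pvNorm x)) = true := by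
            rcases hrx with h | h
            · simp [h]
            · simp [(PySem.Chars.endswith_iff L ('.' :: pvNorm x)).mpr h]
          rw [hm] at hc
          simp at hc
          exact le_trans hc hmono'
        · exact hmax x hx hrx
-- find cand '.' : basic facts
theorem dot_prefix_drop {cand : List Char} {j : ℕ} (h : ['.'] <+: cand.drop j) :
    cand.drop j = '.' :: cand.drop (j + 1) := by
  obtain ⟨t, ht⟩ := h
  have h1 : cand.drop j = '.' :: t := by simpa using ht.symm
  have h2 : cand.drop (j + 1) = t := by
    have := congrArg (List.drop 1) h1
    simpa [List.drop_drop, Nat.add_comm] using this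
  rw [h1, h2]

-- Source B's loop: it returns either [] or a matching member of `bad`, and it is at least as long
-- as every nonempty dot-boundary-suffix match that lies in `bad`.
theorem bLoop_spec (bad : PySem.Set (List Char)) (cand : List Char) :
    (pvBLoop cand bad = [] ∨ (pvBLoop cand bad ∈ bad ∧ MatchesB cand (pvBLoop cand bad))) ∧
    (∀ c, MatchesB cand c → c ∈ bad → c.length ≤ (pvBLoop cand bad).length) := by
  fun_induction pvBLoop cand bad with
  | case1 =>
    -- cand = []
    refine ⟨Or.inl rfl, ?_⟩
    rintro c ⟨hne, hraw | hsuf⟩ _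
    · exact absurd hraw hne
    · simpa using hsuf.length_le
  | case2 cand hnil hmem =>
    -- cand itself is in bad
    refine ⟨Or.inr ⟨hmem, hnil, Or.inl rfl⟩, ?_⟩
    intro c hc _
    exact (rawMatch_suffix hc.2).length_le
  | case3 cand hnil hmem dotv hdot =>
    -- no dot, cand not in bad: no match possible
    have hdv : PySem.Chars.find cand ['.'] = -1 := hdot
    refine ⟨Or.inl rfl, ?_⟩
    rintro c ⟨hne, hraw | hsuf⟩ hbad
    · exact absurd (hraw ▸ hbad) hmem
    · exfalso
      obtain ⟨pre, hpre⟩ := hsuf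
      exact (PySem.Chars.find_eq_neg_one_iff cand ['.']).mp hdv
        ⟨pre, c, by simpa using hpre⟩
  | case4 cand hnil hmem dotv hdot ih =>
    -- chop to the first dot
    have hdv : dotv = PySem.Chars.find cand ['.'] := rfl
    have hne1 : PySem.Chars.find cand ['.'] ≠ -1 := fun h => hdot (hdv ▸ h)
    have hspec := PySem.Chars.findFrom_natCast_spec cand ['.'] 0 (Nat.zero_le _)
      (by rw [Nat.cast_zero, PySem.Chars.findFrom_zero]; exact hne1)
    rw [Nat.cast_zero, PySem.Chars.findFrom_zero] at hspec
    obtain ⟨-, hpref, hmin⟩ := hspec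
    rw [hdv] at ih ⊢
    set d := PySem.Chars.find cand ['.'] with hd
    set cand' := cand.drop (d.toNat + 1) with hc'
    have hdropd : cand.drop d.toNat = '.' :: cand' := dot_prefix_drop hpref
    have hsufc' : ('.' :: cand') <:+ cand := hdropd ▸ List.drop_suffix d.toNat cand
    obtain ⟨ih1, ih2⟩ := ih
    constructor
    · rcases ih1 with h | ⟨hb, hne, hraw⟩
      · exact Or.inl h
      · refine Or.inr ⟨hb, hne, Or.inr ?_⟩
        rcases hraw with h | h
        · rw [h]; exact hsufc'
        · exact (h.trans (List.drop_suffix _ cand))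
    · rintro c ⟨hne, hraw | hsuf⟩ hbad
      · exact absurd (hraw ▸ hbad) hmem
      · -- '.' :: c is a suffix of cand at position j ≥ d
        obtain ⟨pre, hpre⟩ := hsuf
        have hdropj : cand.drop pre.length = '.' :: c := by
          rw [← hpre]; simp
        have hjge : d.toNat ≤ pre.length := by
          by_contra hlt
          exact hmin pre.length (Nat.zero_le _) (by omega) ⟨c, by rw [hdropj]; rfl⟩
        have hdropj1 : cand.drop (pre.length + 1) = c := by
          have := congrArg (List.drop 1) hdropj
          simpa [List.drop_drop, Nat.add_comm] using this
        rcases Nat.eq_or_lt_of_le hjge with heq | hlt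
        · -- j = d : c = cand'
          have hcc : c = cand' := by rw [hc', heq, ← hdropj1]
          exact ih2 c ⟨hne, Or.inl hcc⟩ hbad
        · -- j > d : '.' :: c is a suffix of cand'
          have hsplit : cand'.drop (pre.length - (d.toNat + 1)) = '.' :: c := by
            rw [hc', List.drop_drop, ← hdropj]
            congr 1
            omega
          exact ih2 c ⟨hne, Or.inr (hsplit ▸ List.drop_suffix _ cand')⟩ hbad

-- the two list-level results agree
theorem core (L : List Char) (entries : List String) :
    aFold L entries [] = pvBLoop L (PySem.Set.ofList (entries.map pvNorm)) := by
  set bad := PySem.Set.ofList (entries.map pvNorm) with hbad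
  have hmemS : ∀ c, c ∈ bad ↔ c ∈ entries.map pvNorm := by
    intro c; rw [hbad]; exact PySem.Set.mem_ofList _ c
  obtain ⟨-, hA1, hA2⟩ := aFold_inv L entries []
  obtain ⟨hB1, hB2⟩ := bLoop_spec bad L
  set rA := aFold L entries [] with hra
  set rB := pvBLoop L bad with hrb
  rcases hA1 with hAe | ⟨hAm, hAmm⟩
  · -- A found nothing: B cannot find anything either
    rcases hB1 with hBe | ⟨hBm, hBmm⟩
    · rw [hAe, hBe]
    · exfalso
      obtain ⟨e, he, hne⟩ := List.mem_map.mp ((hmemS rB).mp hBm)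
      have := hA2 e he (hne.symm ▸ hBmm.2)
      rw [hAe] at this
      simp at this
      apply hBmm.1
      rw [hne] at this
      exact this
  · -- A found rA: B finds something of the same length
    have hle1 : rA.length ≤ rB.length := hB2 rA hAmm ((hmemS rA).mpr hAm)
    have hBne : rB ≠ [] := by
      intro h
      have := hle1
      rw [h] at this; simp at this
      exact hAmm.1 this
    rcases hB1 with hBe | ⟨hBm, hBmm⟩
    · exact absurd hBe hBne
    · obtain ⟨e, he, hne⟩ := List.mem_map.mp ((hmemS rB).mp hBm)
      have hle2 : rB.length ≤ rA.length := hne ▸ hA2 e he (hne.symm ▸ hBmm.2)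
      exact matches_unique hAmm hBmm (Nat.le_antisymm hle1 hle2)

-- ===== VERDICT (by name: the statement is the Claim_ definition above) =====
theorem match_domain_suffix_py_spec : Claim_equal_match_domain_suffix_py := by
  intro qname intel _ hpre
  unfold Spec_match_domain_suffix_py match_domain_suffix_py match_domain_suffix_py_alt
  by_cases hq : qname.toList = []
  · simp [hq]
  · rw [if_neg hq, if_neg hq]
    have hsome : ((PySem.Dict.mk intel).get? "known_bad_domains").isSome = true := by
      rcases hpre with h | h
      · exact absurd (h ▸ rfl) hq
      · exact h
    obtain ⟨entries, hent⟩ := Option.isSome_iff_exists.mp hsome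
    rw [hent]
    exact congrArg String.mk (core _ entries)
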